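-- pv_equiv track=rewrite | github.com/chrishayuk/chuk-mlx | core/batch/bucketing.py | merge_small_buckets
-- ===== SOURCE A (Python) =====
-- def merge_small_buckets(buckets, max_batch_size):
--     """Merge small buckets to create larger batches, ensuring they do not exceed the maximum batch size."""
--     merged_buckets = {}
--     current_bucket = []
--     current_seq_length = None
--
--     for seq_length, bucket in sorted(buckets.items(), key=lambda x: x[0] if isinstance(x[0], tuple) else (x[0], 0)):
--         for pair in bucket:
--             if len(current_bucket) + 1 > max_batch_size:
--                 if current_seq_length is not None:
--                     merged_buckets[current_seq_length] = current_bucket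
--                 current_bucket = []
--                 current_seq_length = None
--
--             current_bucket.append(pair)
--             if current_seq_length is None:
--                 current_seq_length = seq_length
--
--     if current_bucket:
--         merged_buckets[current_seq_length] = current_bucket
--
--     return merged_buckets
-- ===== SOURCE B (Python) =====
-- def merge_small_buckets(buckets, max_batch_size):
--     """Merge small buckets into batches of up to max_batch_size pairs (chunk size at least 1)."""
--     step = max(max_batch_size, 1)
--     items = [(seq_length, pair)
--              for seq_length, bucket in sorted(buckets.items(),
--                                               key=lambda x: x[0] if isinstance(x[0], tuple) else (x[0], 0))
--              for pair in bucket]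
--     merged = {}
--     while items:
--         chunk, items = items[:step], items[step:]
--         merged[chunk[0][0]] = [pair for _, pair in chunk]
--     return merged
-- ===== Notes on version B (the rewrite author's own statement) =====
-- stated objective: simpler
-- what changed: A's stateful loop (a running current_bucket with an overflow-flush in the middle and a second flush after the loop) is replaced by flattening the sorted buckets into one item list and slicing it into consecutive chunks of max(max_batch_size, 1), keying each chunk by its first seq_length.
import Mathlib
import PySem

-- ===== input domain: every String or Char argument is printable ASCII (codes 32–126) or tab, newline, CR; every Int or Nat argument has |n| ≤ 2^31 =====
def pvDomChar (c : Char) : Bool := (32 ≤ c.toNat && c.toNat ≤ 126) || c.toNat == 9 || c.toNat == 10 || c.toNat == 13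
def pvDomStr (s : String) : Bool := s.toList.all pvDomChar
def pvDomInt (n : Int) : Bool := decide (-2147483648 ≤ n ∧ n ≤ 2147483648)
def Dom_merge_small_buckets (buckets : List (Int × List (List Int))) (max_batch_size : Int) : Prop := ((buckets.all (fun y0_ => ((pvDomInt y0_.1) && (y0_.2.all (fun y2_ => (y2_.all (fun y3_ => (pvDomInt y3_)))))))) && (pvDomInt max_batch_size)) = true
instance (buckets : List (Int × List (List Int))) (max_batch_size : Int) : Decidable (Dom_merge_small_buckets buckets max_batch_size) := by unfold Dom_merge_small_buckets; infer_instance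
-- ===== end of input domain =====

-- B replaces A's stateful flush-on-overflow accumulator by one flat item list cut into
-- consecutive chunks of size max(max_batch_size, 1) (objective: simpler decomposition, same cost).

-- ===== PORT A =====
-- one inner-loop iteration of A ('for pair in bucket: …') over the state (merged, current_bucket, current_seq_length)
def pvStepA (max_batch_size : Int)
    (st : PySem.Dict Int (List (List Int)) × List (List Int) × Option Int)
    (seq_length : Int) (pair : List Int) :
    PySem.Dict Int (List (List Int)) × List (List Int) × Option Int :=
  let (merged, current, curSeq) := st
  let (merged, current, curSeq) :=
    if (current.length : Int) + 1 > max_batch_size then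
      ((match curSeq with
        | some s => merged.insert s current
        | none => merged), ([] : List (List Int)), (none : Option Int))
    else (merged, current, curSeq)
  (merged, current ++ [pair],
   match curSeq with
   | none => some seq_length
   | some s => some s)

-- A's trailing 'if current_bucket: merged_buckets[current_seq_length] = current_bucket'
-- (the 'none' branch is unreachable: current ≠ [] forces curSeq = some _; Python would key by None there)
def pvFinishA (st : PySem.Dict Int (List (List Int)) × List (List Int) × Option Int) :
    PySem.Dict Int (List (List Int)) :=
  let (merged, current, curSeq) := st
  if current.isEmpty then merged
  else match curSeq with
       | some s => merged.insert s current
       | none => merged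

def merge_small_buckets (buckets : List (Int × List (List Int))) (max_batch_size : Int) : List (Int × List (List Int)) :=
  -- keys are ints here, so A's sort key 'x[0] if isinstance(x[0], tuple) else (x[0], 0)' is the tuple (x[0], 0)
  (pvFinishA
    ((PySem.List.sorted2 buckets (fun x => x.1) (fun _ => (0 : Int)) false).foldl
      (fun st sb => sb.2.foldl (fun st pair => pvStepA max_batch_size st sb.1 pair) st)
      (PySem.Dict.empty, [], none))).items

-- ===== PORT B =====
-- Source B's 'while items:' loop; step ≥ 1 at every call, so items[:step] = x :: rest.take (step-1)
-- and items[step:] = rest.drop (step-1)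
def pvChunkLoopB (step : Nat) (merged : PySem.Dict Int (List (List Int))) :
    List (Int × List Int) → PySem.Dict Int (List (List Int))
  | [] => merged
  | x :: rest =>
      pvChunkLoopB step (merged.insert x.1 (x.2 :: (rest.take (step - 1)).map Prod.snd))
        (rest.drop (step - 1))
  termination_by items => items.length
  decreasing_by simp only [List.length_drop, List.length_cons]; omega

def merge_small_buckets_alt (buckets : List (Int × List (List Int))) (max_batch_size : Int) : List (Int × List (List Int)) :=
  let step := (max max_batch_size 1).toNat
  let items := (PySem.List.sorted2 buckets (fun x => x.1) (fun _ => (0 : Int)) false).flatMap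
    (fun sb => sb.2.map (fun pair => (sb.1, pair)))
  (pvChunkLoopB step PySem.Dict.empty items).items

-- ===== PRECONDITION & SPEC =====
def Spec_merge_small_buckets (buckets : List (Int × List (List Int))) (max_batch_size : Int) (out : List (Int × List (List Int))) : Prop := out = merge_small_buckets_alt buckets max_batch_size
instance (buckets : List (Int × List (List Int))) (max_batch_size : Int) (out : List (Int × List (List Int))) : Decidable (Spec_merge_small_buckets buckets max_batch_size out) := by unfold Spec_merge_small_buckets; infer_instance

-- ===== CLAIM (what is proved, stated in full; the proofs are below) =====
def Claim_equal_merge_small_buckets : Prop := ∀ (buckets : List (Int × List (List Int))) (max_batch_size : Int), Dom_merge_small_buckets buckets max_batch_size → Spec_merge_small_buckets buckets max_batch_size (merge_small_buckets buckets max_batch_size)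

-- ===== LEMMAS AND PROOFS =====

lemma pvChunkLoopB_nil (step : Nat) (m : PySem.Dict Int (List (List Int))) :
    pvChunkLoopB step m [] = m := by
  rw [pvChunkLoopB]

lemma pvChunkLoopB_cons (step : Nat) (m : PySem.Dict Int (List (List Int)))
    (x : Int × List Int) (rest : List (Int × List Int)) :
    pvChunkLoopB step m (x :: rest)
      = pvChunkLoopB step (m.insert x.1 (x.2 :: (rest.take (step - 1)).map Prod.snd))
          (rest.drop (step - 1)) := by
  rw [pvChunkLoopB]

-- from the empty state, a step just starts a new chunk (mbs ≤ 0 flushes an empty bucket, a no-op)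
lemma pvStepA_empty (mbs : Int) (m : PySem.Dict Int (List (List Int))) (s : Int) (p : List Int) :
    pvStepA mbs (m, [], none) s p = (m, [p], some s) := by
  simp only [pvStepA]
  split <;> rfl

lemma pvStepA_append (mbs : Int) (m : PySem.Dict Int (List (List Int))) (cur : List (List Int))
    (s q : Int) (p : List Int) (h : cur ≠ []) (hlt : cur.length < (max mbs 1).toNat) :
    pvStepA mbs (m, cur, some s) q p = (m, cur ++ [p], some s) := by
  have h1 : 0 < cur.length := List.length_pos_of_ne_nil h
  have hc : ¬((cur.length : Int) + 1 > mbs) := by omega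
  simp only [pvStepA, if_neg hc]

lemma pvStepA_flush (mbs : Int) (m : PySem.Dict Int (List (List Int))) (cur : List (List Int))
    (s q : Int) (p : List Int) (h : cur ≠ []) (hge : (max mbs 1).toNat ≤ cur.length) :
    pvStepA mbs (m, cur, some s) q p = (m.insert s cur, [p], some q) := by
  have h1 : 0 < cur.length := List.length_pos_of_ne_nil h
  have hc : (cur.length : Int) + 1 > mbs := by omega
  simp only [pvStepA, if_pos hc, List.nil_append]

-- A's nested loop over (seq_length, bucket) pairs is the flat loop over all (seq_length, pair) items
lemma pvNestedFold {β : Type} (f : β → Int × List Int → β) :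
    ∀ (bs : List (Int × List (List Int))) (init : β),
      bs.foldl (fun st sb => sb.2.foldl (fun st p => f st (sb.1, p)) st) init
        = (bs.flatMap (fun sb => sb.2.map (fun p => (sb.1, p)))).foldl f init := by
  intro bs
  induction bs with
  | nil => intro init; rfl
  | cons sb rest ih =>
      intro init
      simp only [List.foldl_cons, List.flatMap_cons, List.foldl_append, List.foldl_map, ih]

-- running A from a partially filled chunk (cur, keyed s) with remaining capacity c:
-- either everything fits, or exactly c more items are absorbed and the loop restarts empty
lemma pvFillA (mbs : Int) :
    ∀ (rest : List (Int × List Int)) (c : Nat) (m : PySem.Dict Int (List (List Int)))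
      (s : Int) (cur : List (List Int)), cur ≠ [] → cur.length + c = (max mbs 1).toNat →
      pvFinishA (rest.foldl (fun st x => pvStepA mbs st x.1 x.2) (m, cur, some s))
        = if rest.length ≤ c then m.insert s (cur ++ rest.map Prod.snd)
          else pvFinishA ((rest.drop c).foldl (fun st x => pvStepA mbs st x.1 x.2)
            (m.insert s (cur ++ (rest.take c).map Prod.snd), [], none)) := by
  intro rest
  induction rest with
  | nil =>
      intro c m s cur hne _
      simp [pvFinishA, List.isEmpty_iff, hne]
  | cons y ys ih =>
      intro c m s cur hne hlen
      cases c with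
      | zero =>
          have hge : (max mbs 1).toNat ≤ cur.length := by omega
          simp only [List.foldl_cons, pvStepA_flush mbs m cur s y.1 y.2 hne hge,
            List.length_cons, List.take_zero, List.drop_zero, List.map_nil, List.append_nil]
          rw [if_neg (by omega)]
          simp only [pvStepA_empty]
      | succ c' =>
          have hlt : cur.length < (max mbs 1).toNat := by omega
          simp only [List.foldl_cons, pvStepA_append mbs m cur s y.1 y.2 hne hlt]
          rw [ih c' m s (cur ++ [y.2]) (by simp) (by simp; omega)]
          simp only [List.length_cons, List.take_succ_cons, List.drop_succ_cons,
            List.map_cons, List.append_assoc, List.cons_append, List.nil_append]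
          by_cases hy : ys.length ≤ c'
          · rw [if_pos hy, if_pos (by omega)]
          · rw [if_neg hy, if_neg (by omega)]

-- the whole of A's loop (plus the final flush) is B's chunk loop
lemma pvMainA (mbs : Int) :
    ∀ (n : Nat) (items : List (Int × List Int)) (m : PySem.Dict Int (List (List Int))),
      items.length ≤ n →
      pvFinishA (items.foldl (fun st x => pvStepA mbs st x.1 x.2) (m, [], none))
        = pvChunkLoopB (max mbs 1).toNat m items := by
  intro n
  induction n with
  | zero =>
      intro items m hlen
      have : items = [] := List.eq_nil_of_length_eq_zero (by omega)
      subst this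
      simp [pvFinishA, pvChunkLoopB_nil]
  | succ n ih =>
      intro items m hlen
      cases items with
      | nil => simp [pvFinishA, pvChunkLoopB_nil]
      | cons x rest =>
          have hstep : 1 ≤ (max mbs 1).toNat := by omega
          simp only [List.foldl_cons, pvStepA_empty]
          rw [pvFillA mbs rest ((max mbs 1).toNat - 1) m x.1 [x.2] (by simp) (by simp only [List.length_cons, List.length_nil]; omega)]
          rw [pvChunkLoopB_cons]
          by_cases hy : rest.length ≤ (max mbs 1).toNat - 1
          · rw [if_pos hy]
            rw [List.take_of_length_le hy, List.drop_eq_nil_of_le hy, pvChunkLoopB_nil]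
            simp
          · rw [if_neg hy]
            rw [ih (rest.drop ((max mbs 1).toNat - 1))
                (m.insert x.1 ([x.2] ++ (rest.take ((max mbs 1).toNat - 1)).map Prod.snd))
                (by simp only [List.length_drop]; simp at hlen; omega)]
            simp

-- ===== VERDICT (by name: the statement is the Claim_ definition above) =====
theorem merge_small_buckets_spec : Claim_equal_merge_small_buckets := by
  intro buckets mbs _
  show _ = _
  simp only [merge_small_buckets, merge_small_buckets_alt]
  rw [pvNestedFold (fun st (x : Int × List Int) => pvStepA mbs st x.1 x.2)]
  rw [pvMainA mbs _ _ _ (le_refl _)]
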